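-- pv_equiv track=rewrite | github.com/fraserbaigent/aoc | 2024/14/solution.py | is_neighbour
-- ===== SOURCE A (Python) =====
-- def is_neighbour(pt1, pt2):
--     if pt1 == pt2:
--         return True
--     for dx in [-1, 0, +1]:
--         for dy in [-1, 0, +1]:
--             if pt1[0] + dx == pt2[0] and pt1[1] + dy == pt2[1]:
--                 return True
--     return False
-- ===== SOURCE B (Python) =====
-- def is_neighbour(pt1, pt2):
--     return abs(pt1[0] - pt2[0]) <= 1 and abs(pt1[1] - pt2[1]) <= 1
-- ===== Notes on version B (the rewrite author's own statement) =====
-- stated objective: simpler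
-- what changed: Replaces the pt1==pt2 guard plus the 3x3 nested offset enumeration with a single closed-form Chebyshev-distance test: abs(dx)<=1 and abs(dy)<=1.
import Mathlib
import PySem

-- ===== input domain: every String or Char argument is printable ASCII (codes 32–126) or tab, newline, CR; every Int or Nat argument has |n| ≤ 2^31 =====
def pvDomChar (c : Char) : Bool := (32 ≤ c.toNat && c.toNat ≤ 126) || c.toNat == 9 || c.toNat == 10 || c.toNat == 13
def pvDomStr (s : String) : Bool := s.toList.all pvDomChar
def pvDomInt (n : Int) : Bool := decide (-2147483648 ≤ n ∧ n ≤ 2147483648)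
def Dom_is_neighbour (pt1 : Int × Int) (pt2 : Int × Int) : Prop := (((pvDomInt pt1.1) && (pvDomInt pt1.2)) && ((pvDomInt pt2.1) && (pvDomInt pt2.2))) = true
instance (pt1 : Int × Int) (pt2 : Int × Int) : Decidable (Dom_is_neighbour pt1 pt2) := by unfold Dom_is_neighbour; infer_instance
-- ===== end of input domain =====

-- B replaces A's pt1==pt2 guard and 3x3 offset enumeration with one closed-form Chebyshev test (simpler, same result).
-- ===== PORT A =====
-- literal port of A: equality guard, then for dx in [-1,0,1]: for dy in [-1,0,1]: early return True on a match
def is_neighbour (pt1 : Int × Int) (pt2 : Int × Int) : Bool :=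
  if pt1 = pt2 then true
  else
    [(-1 : Int), 0, 1].any (fun dx =>
      [(-1 : Int), 0, 1].any (fun dy =>
        pt1.1 + dx = pt2.1 && pt1.2 + dy = pt2.2))

-- ===== PORT B =====
def is_neighbour_alt (pt1 : Int × Int) (pt2 : Int × Int) : Bool :=
  (pt1.1 - pt2.1).natAbs ≤ 1 && (pt1.2 - pt2.2).natAbs ≤ 1

-- ===== PRECONDITION & SPEC =====
def Spec_is_neighbour (pt1 : Int × Int) (pt2 : Int × Int) (out : Bool) : Prop := out = is_neighbour_alt pt1 pt2
instance (pt1 : Int × Int) (pt2 : Int × Int) (out : Bool) : Decidable (Spec_is_neighbour pt1 pt2 out) := by unfold Spec_is_neighbour; infer_instance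

-- ===== CLAIM (what is proved, stated in full; the proofs are below) =====
def Claim_equal_is_neighbour : Prop := ∀ (pt1 : Int × Int) (pt2 : Int × Int), Dom_is_neighbour pt1 pt2 → Spec_is_neighbour pt1 pt2 (is_neighbour pt1 pt2)

-- ===== LEMMAS AND PROOFS =====

-- ===== VERDICT (by name: the statement is the Claim_ definition above) =====
theorem is_neighbour_spec : Claim_equal_is_neighbour := by
  intro pt1 pt2 _
  unfold Spec_is_neighbour is_neighbour is_neighbour_alt
  obtain ⟨a, b⟩ := pt1
  obtain ⟨c, d⟩ := pt2
  simp [List.any, Prod.ext_iff]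
  rw [Bool.eq_iff_iff]
  simp only [Bool.or_eq_true, Bool.and_eq_true, decide_eq_true_eq]
  omega
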